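-- pv_equiv track=rewrite | github.com/lolboi06/CoSensei | terminal_stress_ai/app/code_context_analyzer.py | _function_length
-- ===== SOURCE A (Python) =====
-- from typing import Dict, List, Optional
--
-- def _function_length(language: str, lines: List[str]) -> int:
--     if not lines:
--         return 0
--     if language == "python":
--         for idx, line in enumerate(lines):
--             if line.strip().startswith("def "):
--                 indent = len(line) - len(line.lstrip(" "))
--                 length = 1
--                 for follow in lines[idx + 1 :]:
--                     stripped = follow.strip()
--                     if not stripped:
--                         length += 1
--                         continue
--                     current_indent = len(follow) - len(follow.lstrip(" "))
--                     if current_indent <= indent and not follow.lstrip().startswith("#"):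
--                         break
--                     length += 1
--                 return length
--     return len([line for line in lines if line.strip()])
-- ===== SOURCE B (Python) =====
-- from typing import List
--
--
-- def _function_length(language: str, lines: List[str]) -> int:
--     if not lines:
--         return 0
--     # Single pass state machine: state 0 = searching for the def header,
--     # 1 = inside the function span, 2 = span closed.  The same pass also
--     # tallies the non-blank lines used by every fallback, so the list is
--     # traversed exactly once with no nested loop or slice.
--     state = 0
--     base = 0
--     span = 0
--     nonblank = 0
--     for line in lines:
--         stripped = line.strip()
--         if stripped:
--             nonblank += 1
--         if state == 0:
--             if stripped.startswith("def "):
--                 state = 1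
--                 base = len(line) - len(line.lstrip(" "))
--                 span = 1
--         elif state == 1:
--             if stripped and len(line) - len(line.lstrip(" ")) <= base \
--                     and not line.lstrip().startswith("#"):
--                 state = 2
--             else:
--                 span += 1
--     if language == "python" and state != 0:
--         return span
--     return nonblank
-- ===== Notes on version B (the rewrite author's own statement) =====
-- stated objective: alternative
-- what changed: B replaces A's nested loops with early returns (outer enumerate scan, inner slice loop, separate fallback comprehension) by one flat state-machine fold over the lines that computes the function span and the non-blank count in a single traversal.
import Mathlib
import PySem

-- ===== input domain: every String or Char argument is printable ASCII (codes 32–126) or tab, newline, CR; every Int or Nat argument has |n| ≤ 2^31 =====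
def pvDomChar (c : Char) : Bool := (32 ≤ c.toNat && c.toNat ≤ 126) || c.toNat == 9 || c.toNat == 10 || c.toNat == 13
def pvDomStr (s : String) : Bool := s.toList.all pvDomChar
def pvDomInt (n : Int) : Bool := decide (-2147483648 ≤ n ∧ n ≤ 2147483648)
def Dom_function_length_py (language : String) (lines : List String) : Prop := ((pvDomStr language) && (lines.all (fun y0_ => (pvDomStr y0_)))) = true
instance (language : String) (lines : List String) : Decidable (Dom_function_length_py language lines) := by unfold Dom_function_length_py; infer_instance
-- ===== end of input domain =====

-- B replaces A's nested loops with one flat state-machine fold that computes the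
-- function span and the non-blank count in a single traversal (alternative decomposition).


-- shared helpers (both Pythons use these very expressions verbatim)
-- len(line) - len(line.lstrip(" ")): lstrip(" ") drops exactly the leading spaces (exact)
def pvIndent (line : String) : Int :=
  (line.toList.length : Int) - ((line.toList.dropWhile (· == ' ')).length : Int)
-- line.strip() == ""
def pvBlank (line : String) : Bool := PySem.Str.strip line == ""
-- line.strip().startswith("def ")
def pvIsDef (line : String) : Bool := PySem.Str.startswith (PySem.Str.strip line) "def "
-- current_indent <= indent and not follow.lstrip().startswith("#")
def pvIsStop (indent : Int) (line : String) : Bool :=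
  decide (pvIndent line ≤ indent) && !(PySem.Str.startswith (PySem.Str.lstrip line) "#")
-- len([line for line in lines if line.strip()])
def pvNonEmptyCount (lines : List String) : Int :=
  ((lines.filter (fun line => !(pvBlank line))).length : Int)

-- ===== PORT A =====
-- the inner 'for follow in lines[idx+1:]' loop of A, accumulator 'length'
def pvAInner (indent : Int) (rest : List String) (length : Int) : Int :=
  match rest with
  | [] => length
  | follow :: fs =>
    if pvBlank follow then pvAInner indent fs (length + 1)
    else if pvIsStop indent follow then length
    else pvAInner indent fs (length + 1)

-- the outer 'for idx, line in enumerate(lines)' loop with its early return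
def pvAScan (rest : List String) : Option Int :=
  match rest with
  | [] => none
  | line :: ls =>
    if pvIsDef line then some (pvAInner (pvIndent line) ls 1)
    else pvAScan ls

def function_length_py (language : String) (lines : List String) : Int :=
  if lines = [] then 0
  else if language == "python" then
    match pvAScan lines with
    | some v => v
    | none => pvNonEmptyCount lines
  else pvNonEmptyCount lines

-- ===== PORT B =====
-- one step of B's state machine: state = (mode, base, span, nonblank)
def pvBStep (st : Int × Int × Int × Int) (line : String) : Int × Int × Int × Int :=
  let nonblank' := if pvBlank line then st.2.2.2 else st.2.2.2 + 1
  if st.1 == 0 then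
    if pvIsDef line then (1, pvIndent line, 1, nonblank')
    else (0, st.2.1, st.2.2.1, nonblank')
  else if st.1 == 1 then
    if !(pvBlank line) && pvIsStop st.2.1 line then (2, st.2.1, st.2.2.1, nonblank')
    else (1, st.2.1, st.2.2.1 + 1, nonblank')
  else (st.1, st.2.1, st.2.2.1, nonblank')

def function_length_py_alt (language : String) (lines : List String) : Int :=
  if lines = [] then 0
  else
    let r := lines.foldl pvBStep (0, 0, 0, 0)
    if language == "python" && !(r.1 == 0) then r.2.2.1 else r.2.2.2

-- ===== PRECONDITION & SPEC =====
def Spec_function_length_py (language : String) (lines : List String) (out : Int) : Prop := out = function_length_py_alt language lines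
instance (language : String) (lines : List String) (out : Int) : Decidable (Spec_function_length_py language lines out) := by unfold Spec_function_length_py; infer_instance

-- ===== CLAIM (what is proved, stated in full; the proofs are below) =====
def Claim_equal_function_length_py : Prop := ∀ (language : String) (lines : List String), Dom_function_length_py language lines → Spec_function_length_py language lines (function_length_py language lines)

-- ===== LEMMAS AND PROOFS =====

-- the nonblank component of the fold is the non-blank count, from any state
theorem pvB_nonblank (rest : List String) : ∀ st : Int × Int × Int × Int,
    (rest.foldl pvBStep st).2.2.2 = st.2.2.2 + pvNonEmptyCount rest := by
  induction rest with
  | nil => intro st; simp [pvNonEmptyCount]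
  | cons l ls ih =>
    intro st
    have hstep : (pvBStep st l).2.2.2 =
        st.2.2.2 + (if pvBlank l then 0 else 1) := by
      unfold pvBStep
      split_ifs <;> simp_all
    have hcount : pvNonEmptyCount (l :: ls) =
        (if pvBlank l then 0 else 1) + pvNonEmptyCount ls := by
      unfold pvNonEmptyCount
      cases h : pvBlank l with
      | true => simp [h]
      | false => simp [h]; ring
    simp only [List.foldl_cons, ih, hstep, hcount]
    ring

-- in mode 2 the mode and span components never change
theorem pvB_mode2 (rest : List String) : ∀ b s n : Int,
    (rest.foldl pvBStep (2, b, s, n)).1 = 2 ∧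
    (rest.foldl pvBStep (2, b, s, n)).2.2.1 = s := by
  induction rest with
  | nil => intro b s n; exact ⟨rfl, rfl⟩
  | cons l ls ih =>
    intro b s n
    have hstep : pvBStep (2, b, s, n) l =
        (2, b, s, if pvBlank l then n else n + 1) := by
      simp [pvBStep]
    simp only [List.foldl_cons, hstep]
    exact ih b s _

-- in mode 1 the fold's span equals A's inner accumulator loop, and the mode stays nonzero
theorem pvB_mode1 (rest : List String) : ∀ base acc n : Int,
    (rest.foldl pvBStep (1, base, acc, n)).1 ≠ 0 ∧
    (rest.foldl pvBStep (1, base, acc, n)).2.2.1 = pvAInner base rest acc := by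
  induction rest with
  | nil => intro base acc n; exact ⟨by simp, rfl⟩
  | cons l ls ih =>
    intro base acc n
    by_cases hb : pvBlank l = true
    · have hstep : pvBStep (1, base, acc, n) l = (1, base, acc + 1, n) := by
        simp [pvBStep, hb]
      simp only [List.foldl_cons, hstep, pvAInner, hb, if_true]
      exact ih base (acc + 1) n
    · by_cases hs : pvIsStop base l = true
      · have hstep : pvBStep (1, base, acc, n) l = (2, base, acc, n + 1) := by
          simp [pvBStep, hb, hs]
        simp only [List.foldl_cons, hstep, pvAInner, hb, hs, if_true]
        obtain ⟨h1, h2⟩ := pvB_mode2 ls base acc (n + 1)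
        exact ⟨by rw [h1]; decide, h2⟩
      · have hstep : pvBStep (1, base, acc, n) l = (1, base, acc + 1, n + 1) := by
          simp [pvBStep, hb, hs]
        simp only [List.foldl_cons, hstep, pvAInner, hb, hs]
        exact ih base (acc + 1) (n + 1)

-- from mode 0: no def found keeps mode 0; a def found makes the span equal A's scan value
theorem pvB_mode0 (rest : List String) : ∀ b s n : Int,
    (pvAScan rest = none → (rest.foldl pvBStep (0, b, s, n)).1 = 0) ∧
    (∀ v, pvAScan rest = some v →
      (rest.foldl pvBStep (0, b, s, n)).1 ≠ 0 ∧
      (rest.foldl pvBStep (0, b, s, n)).2.2.1 = v) := by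
  induction rest with
  | nil =>
    intro b s n
    exact ⟨fun _ => rfl, fun v hv => by simp [pvAScan] at hv⟩
  | cons l ls ih =>
    intro b s n
    by_cases hd : pvIsDef l = true
    · have hstep : pvBStep (0, b, s, n) l =
          (1, pvIndent l, 1, if pvBlank l then n else n + 1) := by
        simp [pvBStep, hd]
      constructor
      · intro hnone; simp [pvAScan, hd] at hnone
      · intro v hv
        simp only [pvAScan, hd, if_true, Option.some.injEq] at hv
        simp only [List.foldl_cons, hstep]
        obtain ⟨h1, h2⟩ := pvB_mode1 ls (pvIndent l) 1 (if pvBlank l then n else n + 1)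
        exact ⟨h1, by rw [h2, hv]⟩
    · have hstep : pvBStep (0, b, s, n) l =
          (0, b, s, if pvBlank l then n else n + 1) := by
        simp [pvBStep, hd]
      have hsc : pvAScan (l :: ls) = pvAScan ls := by simp [pvAScan, hd]
      simp only [List.foldl_cons, hstep, hsc]
      exact ih b s _

-- ===== VERDICT (by name: the statement is the Claim_ definition above) =====
theorem function_length_py_spec : Claim_equal_function_length_py := by
  intro language lines _
  unfold Spec_function_length_py function_length_py function_length_py_alt
  by_cases hnil : lines = []
  · simp [hnil]
  · simp only [hnil, if_false]
    obtain ⟨h0, h1⟩ := pvB_mode0 lines 0 0 0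
    have hn := pvB_nonblank lines (0, 0, 0, 0)
    by_cases hlang : (language == "python") = true
    · simp only [hlang, Bool.true_and]
      cases hsc : pvAScan lines with
      | none =>
        have h00 := h0 hsc
        simp [h00, hn]
      | some v =>
        obtain ⟨hne, hv⟩ := h1 v hsc
        have : ((lines.foldl pvBStep (0, 0, 0, 0)).1 == 0) = false := by
          simpa using hne
        simp only [this, Bool.not_false, if_true, hv]
    · simp [hlang, hn]
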